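-- pv_equiv track=rewrite | github.com/JOBAEHUN/baehunjo_pythonproject | 250901_KANC_Double Etching/src/layout/test.py | divide_x
-- ===== SOURCE A (Python) =====
-- def divide_x(x, b_start, b_step):
--     b_results = []
--     a_results = []
--     b = b_start
--     a = 1000  # 초기 a 값 (b_start의 10배)
--     remaining_x = x  # 남은 X 값
--
--     while b > 0 and remaining_x > 0:
--         b_results.append(b)
--         a_results.append(a)
--         consumption = a + b + 628  # 사용되는 길이
--         remaining_x -= consumption
--         if remaining_x <= 0:  # 남은 X가 부족하면 마지막 세그먼트 롤백
--             remaining_x += consumption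
--             break
--         b -= b_step
--         a -= b_step * 2
--
--     return a_results, b_results, remaining_x
-- ===== SOURCE B (Python) =====
-- def divide_x(x, b_start, b_step):
--     # One scalar pass finds the segment count n and the final remaining;
--     # the two lists are then materialized by comprehensions.
--     n = 0
--     remaining = x
--     while True:
--         b_k = b_start - n * b_step
--         if b_k <= 0 or remaining <= 0:
--             break
--         n += 1
--         c = (1000 - 2 * (n - 1) * b_step) + b_k + 628
--         if remaining - c <= 0:
--             break
--         remaining -= c
--     a_results = [1000 - 2 * i * b_step for i in range(n)]
--     b_results = [b_start - i * b_step for i in range(n)]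
--     return a_results, b_results, remaining
-- ===== Notes on version B (the rewrite author's own statement) =====
-- stated objective: alternative
-- what changed: B replaces A's list-appending while-loop by a pure scalar scan that only determines the segment count n and the final remaining budget, and then materializes both arithmetic-progression lists by range comprehensions.
import Mathlib
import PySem

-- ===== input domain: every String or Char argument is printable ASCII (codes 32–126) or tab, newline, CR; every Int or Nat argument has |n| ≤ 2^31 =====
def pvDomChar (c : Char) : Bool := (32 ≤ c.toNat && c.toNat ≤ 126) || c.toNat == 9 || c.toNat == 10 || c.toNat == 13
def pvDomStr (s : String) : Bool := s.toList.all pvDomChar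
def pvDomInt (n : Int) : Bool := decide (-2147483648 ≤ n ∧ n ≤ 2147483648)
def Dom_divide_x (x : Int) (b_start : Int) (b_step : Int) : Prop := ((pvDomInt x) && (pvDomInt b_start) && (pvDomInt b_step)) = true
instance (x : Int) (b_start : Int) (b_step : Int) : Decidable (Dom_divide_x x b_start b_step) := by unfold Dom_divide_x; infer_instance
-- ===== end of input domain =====

-- B determines only the segment count and final remaining in a scalar scan and builds
-- the two lists afterwards by comprehensions; same cost, different decomposition.
-- Both while-loops are made total with the same fuel guard (the equivalence below is
-- proved for every fuel and every input, including fuel exhaustion).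

-- ===== PORT A =====
-- A's while-loop: state (b, a, remaining, reversed b_results, reversed a_results)
def divideLoopA (b_step : Int) : Nat → Int → Int → Int → List Int → List Int → List Int × List Int × Int
  | 0, _, _, rem, accB, accA => (accA.reverse, accB.reverse, rem)
  | fuel+1, b, a, rem, accB, accA =>
    if b > 0 ∧ rem > 0 then
      let accB' := b :: accB
      let accA' := a :: accA
      let c := a + b + 628
      let rem' := rem - c
      if rem' ≤ 0 then (accA'.reverse, accB'.reverse, rem' + c)
      else divideLoopA b_step fuel (b - b_step) (a - 2 * b_step) rem' accB' accA'
    else (accA.reverse, accB.reverse, rem)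

def divide_x (x : Int) (b_start : Int) (b_step : Int) : List Int × List Int × Int :=
  divideLoopA b_step (2 ^ 32) b_start 1000 x [] []

-- ===== PORT B =====
-- B's scalar scan: state (n, remaining); returns the segment count and final remaining
def divideLoopB (b_start b_step : Int) : Nat → Nat → Int → Nat × Int
  | 0, n, rem => (n, rem)
  | fuel+1, n, rem =>
    let b_k := b_start - (n : Int) * b_step
    if b_k ≤ 0 ∨ rem ≤ 0 then (n, rem)
    else
      let c := (1000 - 2 * (n : Int) * b_step) + b_k + 628
      if rem - c ≤ 0 then (n + 1, rem)
      else divideLoopB b_start b_step fuel (n + 1) (rem - c)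

def divide_x_alt (x : Int) (b_start : Int) (b_step : Int) : List Int × List Int × Int :=
  let p := divideLoopB b_start b_step (2 ^ 32) 0 x
  ((List.range p.1).map (fun i => 1000 - 2 * (i : Int) * b_step),
   (List.range p.1).map (fun i => b_start - (i : Int) * b_step),
   p.2)

-- ===== PRECONDITION & SPEC =====
def Spec_divide_x (x : Int) (b_start : Int) (b_step : Int) (out : List Int × List Int × Int) : Prop := out = divide_x_alt x b_start b_step
instance (x : Int) (b_start : Int) (b_step : Int) (out : List Int × List Int × Int) : Decidable (Spec_divide_x x b_start b_step out) := by unfold Spec_divide_x; infer_instance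

-- ===== CLAIM (what is proved, stated in full; the proofs are below) =====
def Claim_equal_divide_x : Prop := ∀ (x : Int) (b_start : Int) (b_step : Int), Dom_divide_x x b_start b_step → Spec_divide_x x b_start b_step (divide_x x b_start b_step)

-- ===== LEMMAS AND PROOFS =====

-- Loop simulation: if the accumulators hold exactly the first n segments (reversed) and
-- (b, a) are the n-th terms of the two progressions, the two loops produce the same output.
theorem divideLoop_sim (b_start b_step : Int) :
    ∀ (fuel : Nat) (n : Nat) (rem : Int),
      divideLoopA b_step fuel (b_start - (n : Int) * b_step) (1000 - 2 * (n : Int) * b_step) rem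
          (((List.range n).map (fun i => b_start - (i : Int) * b_step)).reverse)
          (((List.range n).map (fun i => 1000 - 2 * (i : Int) * b_step)).reverse)
        =
      (let p := divideLoopB b_start b_step fuel n rem
       ((List.range p.1).map (fun i => 1000 - 2 * (i : Int) * b_step),
        (List.range p.1).map (fun i => b_start - (i : Int) * b_step),
        p.2)) := by
  intro fuel
  induction fuel with
  | zero => intro n rem; simp [divideLoopA, divideLoopB]
  | succ fuel ih =>
    intro n rem
    by_cases hg : b_start - (n : Int) * b_step > 0 ∧ rem > 0
    · have hg' : ¬ (b_start - (n : Int) * b_step ≤ 0 ∨ rem ≤ 0) := by omega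
      by_cases hc : rem - ((1000 - 2 * (n : Int) * b_step) + (b_start - (n : Int) * b_step) + 628) ≤ 0
      · simp only [divideLoopA, divideLoopB, if_pos hg, if_neg hg', if_pos hc]
        have hb : rem - ((1000 - 2 * (n : Int) * b_step) + (b_start - (n : Int) * b_step) + 628)
            + ((1000 - 2 * (n : Int) * b_step) + (b_start - (n : Int) * b_step) + 628) = rem := by ring
        simp [List.range_succ, hb]
      · simp only [divideLoopA, divideLoopB, if_pos hg, if_neg hg', if_neg hc]
        have e1 : b_start - (n : Int) * b_step - b_step = b_start - ((n + 1 : Nat) : Int) * b_step := by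
          push_cast; ring
        have e2 : 1000 - 2 * (n : Int) * b_step - 2 * b_step = 1000 - 2 * ((n + 1 : Nat) : Int) * b_step := by
          push_cast; ring
        have e3 : (b_start - (n : Int) * b_step) ::
              ((List.range n).map (fun i => b_start - (i : Int) * b_step)).reverse
            = ((List.range (n + 1)).map (fun i => b_start - (i : Int) * b_step)).reverse := by
          simp [List.range_succ]
        have e4 : (1000 - 2 * (n : Int) * b_step) ::
              ((List.range n).map (fun i => 1000 - 2 * (i : Int) * b_step)).reverse
            = ((List.range (n + 1)).map (fun i => 1000 - 2 * (i : Int) * b_step)).reverse := by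
          simp [List.range_succ]
        rw [e1, e2, e3, e4, ih (n + 1)]
    · have hg' : b_start - (n : Int) * b_step ≤ 0 ∨ rem ≤ 0 := by omega
      simp only [divideLoopA, divideLoopB, if_neg hg, if_pos hg']
      simp

-- ===== VERDICT (by name: the statement is the Claim_ definition above) =====
theorem divide_x_spec : Claim_equal_divide_x := by
  intro x b_start b_step _
  show divide_x x b_start b_step = divide_x_alt x b_start b_step
  have h := divideLoop_sim b_start b_step (2 ^ 32) 0 x
  simpa [divide_x, divide_x_alt] using h
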